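-- pv_equiv track=rewrite | github.com/duartelopes19/FEUP-IA | board.py | get_mirror_chambers
-- ===== SOURCE A (Python) =====
-- def get_mirror_chambers(size):
--     mirror_chambers = []
--     for row in range(size):
--         for col in range(size):
--             if (row, col) != (2, 2) and \
--                (row == 0 or row == size-1 or col == 0 or col == size-1):
--                 mirror_chambers.append((row, col))
--     return mirror_chambers
-- ===== SOURCE B (Python) =====
-- def get_mirror_chambers(size):
--     if size <= 0:
--         return []
--     if size == 1:
--         return [(0, 0)]
--     cells = [(0, c) for c in range(size)]
--     for r in range(1, size - 1):
--         cells += [(r, 0), (r, size - 1)]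
--     cells += [(size - 1, c) for c in range(size)]
--     return [cell for cell in cells if cell != (2, 2)]
-- ===== Notes on version B (the rewrite author's own statement) =====
-- stated objective: faster
-- what changed: Instead of scanning all size*size grid cells and testing each for border membership, B emits the border cells directly (full top row, the two side cells of each middle row, full bottom row) and filters out (2,2).
import Mathlib
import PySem

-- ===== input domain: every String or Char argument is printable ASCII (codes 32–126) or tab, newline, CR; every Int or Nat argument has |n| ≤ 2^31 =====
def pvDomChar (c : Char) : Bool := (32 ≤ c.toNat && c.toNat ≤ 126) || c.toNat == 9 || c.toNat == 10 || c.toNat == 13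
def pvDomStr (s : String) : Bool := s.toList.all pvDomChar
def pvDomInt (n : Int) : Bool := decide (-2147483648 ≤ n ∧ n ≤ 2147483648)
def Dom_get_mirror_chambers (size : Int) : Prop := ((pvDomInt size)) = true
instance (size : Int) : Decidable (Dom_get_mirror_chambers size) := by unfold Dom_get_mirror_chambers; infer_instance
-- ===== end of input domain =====

-- B emits the border directly (top row, side cells of middle rows, bottom row) in O(size)
-- instead of scanning the full size×size grid; same return value.

-- ===== PORT A =====
def get_mirror_chambers (size : Int) : List (Int × Int) :=
  (PySem.List.pyRange 0 size 1).foldl (fun acc row =>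
    (PySem.List.pyRange 0 size 1).foldl (fun acc2 col =>
      if (row, col) ≠ ((2 : Int), (2 : Int)) ∧
         (row = 0 ∨ row = size - 1 ∨ col = 0 ∨ col = size - 1)
      then acc2 ++ [(row, col)] else acc2) acc) []

-- ===== PORT B =====
def get_mirror_chambers_alt (size : Int) : List (Int × Int) :=
  if size ≤ 0 then []
  else if size = 1 then [((0 : Int), (0 : Int))]
  else
    let top := (PySem.List.pyRange 0 size 1).map (fun c => ((0 : Int), c))
    let mid := (PySem.List.pyRange 1 (size - 1) 1).foldl
      (fun acc r => acc ++ [(r, (0 : Int)), (r, size - 1)]) top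
    let cells := mid ++ (PySem.List.pyRange 0 size 1).map (fun c => (size - 1, c))
    cells.filter (fun cell => cell ≠ ((2 : Int), (2 : Int)))

-- ===== PRECONDITION & SPEC =====
def Spec_get_mirror_chambers (size : Int) (out : List (Int × Int)) : Prop := out = get_mirror_chambers_alt size
instance (size : Int) (out : List (Int × Int)) : Decidable (Spec_get_mirror_chambers size out) := by unfold Spec_get_mirror_chambers; infer_instance

-- ===== CLAIM (what is proved, stated in full; the proofs are below) =====
def Claim_equal_get_mirror_chambers : Prop := ∀ (size : Int), Dom_get_mirror_chambers size → Spec_get_mirror_chambers size (get_mirror_chambers size)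

-- ===== LEMMAS AND PROOFS =====

-- A as a flatMap over rows of the filtered columns of that row
theorem getmc_A_flatMap (size : Int) :
    get_mirror_chambers size =
      (PySem.List.pyRange 0 size 1).flatMap (fun row =>
        ((PySem.List.pyRange 0 size 1).filter (fun col =>
          decide ((row, col) ≠ ((2 : Int), (2 : Int)) ∧
            (row = 0 ∨ row = size - 1 ∨ col = 0 ∨ col = size - 1)))).map
          (fun col => (row, col))) := by
  unfold get_mirror_chambers
  simp only [PySem.List.foldl_append_ite, PySem.List.foldl_append_eq_flatMap,
    List.nil_append]

-- splitting range(0,n) at the two border indices, for n ≥ 2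
theorem getmc_range_split (n : Int) (hn : 2 ≤ n) :
    PySem.List.pyRange 0 n 1 =
      [(0 : Int)] ++ PySem.List.pyRange 1 (n - 1) 1 ++ [n - 1] := by
  rw [PySem.List.pyRange_one_append 0 1 n (by omega) (by omega),
      PySem.List.pyRange_one_append 1 (n - 1) n (by omega) (by omega)]
  have h1 : PySem.List.pyRange 0 1 1 = [(0 : Int)] := by
    simpa using PySem.List.pyRange_one_singleton (a := (0 : Int))
  have h2 : PySem.List.pyRange (n - 1) n 1 = [n - 1] := by
    have := PySem.List.pyRange_one_singleton (a := n - 1)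
    simpa [show n - 1 + 1 = n by omega] using this
  rw [h1, h2, List.append_assoc]

theorem getmc_main (size : Int) :
    get_mirror_chambers size = get_mirror_chambers_alt size := by
  rw [getmc_A_flatMap]
  unfold get_mirror_chambers_alt
  by_cases h0 : size ≤ 0
  · simp [h0, PySem.List.pyRange_one_eq_nil h0]
  · by_cases h1 : size = 1
    · subst h1; decide
    · have hn : 2 ≤ size := by omega
      simp only [if_neg h0, if_neg h1]
      -- splitting the OUTER row range only
      have hA : ∀ (f : Int → List (Int × Int)),
          (PySem.List.pyRange 0 size 1).flatMap f =
            f 0 ++ (PySem.List.pyRange 1 (size - 1) 1).flatMap f ++ f (size - 1) := by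
        intro f
        rw [getmc_range_split size hn]
        simp [List.flatMap_append]
      rw [hA]
      beta_reduce
      -- B: turn the foldl into top ++ flatMap
      rw [PySem.List.foldl_append_eq_flatMap]
      -- row 0: every column kept
      have hrow0 :
          ((PySem.List.pyRange 0 size 1).filter (fun col =>
            decide (((0 : Int), col) ≠ ((2 : Int), (2 : Int)) ∧
              ((0 : Int) = 0 ∨ (0 : Int) = size - 1 ∨ col = 0 ∨ col = size - 1)))) =
            PySem.List.pyRange 0 size 1 := by
        apply List.filter_eq_self.mpr
        intro col _
        simp
      -- middle rows: exactly the two side columns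
      have hmid : ∀ r ∈ PySem.List.pyRange 1 (size - 1) 1,
          (((PySem.List.pyRange 0 size 1).filter (fun col =>
            decide ((r, col) ≠ ((2 : Int), (2 : Int)) ∧
              (r = 0 ∨ r = size - 1 ∨ col = 0 ∨ col = size - 1)))).map
            (fun col => (r, col))) = [(r, (0 : Int)), (r, size - 1)] := by
        intro r hr
        rw [PySem.List.mem_pyRange_one] at hr
        rw [getmc_range_split size hn]
        rw [List.filter_append, List.filter_append]
        have hf0 : List.filter (fun col =>
            decide ((r, col) ≠ ((2 : Int), (2 : Int)) ∧
              (r = 0 ∨ r = size - 1 ∨ col = 0 ∨ col = size - 1))) [(0 : Int)] =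
            [(0 : Int)] := by
          simp [Prod.ext_iff] <;> omega
        have hfm : List.filter (fun col =>
            decide ((r, col) ≠ ((2 : Int), (2 : Int)) ∧
              (r = 0 ∨ r = size - 1 ∨ col = 0 ∨ col = size - 1)))
            (PySem.List.pyRange 1 (size - 1) 1) = [] := by
          apply List.filter_eq_nil_iff.mpr
          intro col hcol
          rw [PySem.List.mem_pyRange_one] at hcol
          simp only [decide_eq_true_eq, not_and, not_or]
          intro _
          omega
        have hfl : List.filter (fun col =>
            decide ((r, col) ≠ ((2 : Int), (2 : Int)) ∧
              (r = 0 ∨ r = size - 1 ∨ col = 0 ∨ col = size - 1))) [size - 1] =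
            [size - 1] := by
          simp [Prod.ext_iff] <;> omega
        rw [hf0, hfm, hfl]
        simp
      have hmidflat :
          (PySem.List.pyRange 1 (size - 1) 1).flatMap (fun r =>
            ((PySem.List.pyRange 0 size 1).filter (fun col =>
              decide ((r, col) ≠ ((2 : Int), (2 : Int)) ∧
                (r = 0 ∨ r = size - 1 ∨ col = 0 ∨ col = size - 1)))).map
              (fun col => (r, col))) =
          (PySem.List.pyRange 1 (size - 1) 1).flatMap
            (fun r => [(r, (0 : Int)), (r, size - 1)]) := by
        rw [List.flatMap_def, List.flatMap_def, List.map_congr_left hmid]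
      -- bottom row: drop only (2,2)
      have hbot :
          (((PySem.List.pyRange 0 size 1).filter (fun col =>
            decide ((size - 1, col) ≠ ((2 : Int), (2 : Int)) ∧
              (size - 1 = 0 ∨ size - 1 = size - 1 ∨ col = 0 ∨ col = size - 1)))).map
            (fun col => (size - 1, col))) =
          ((PySem.List.pyRange 0 size 1).map (fun c => (size - 1, c))).filter
            (fun cell => decide (cell ≠ ((2 : Int), (2 : Int)))) := by
        rw [List.filter_map]
        congr 1
        apply List.filter_congr
        intro col _
        simp
      -- B's filter: top and middle cells all survive
      have htopf :
          ((PySem.List.pyRange 0 size 1).map (fun c => ((0 : Int), c))).filter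
            (fun cell => decide (cell ≠ ((2 : Int), (2 : Int)))) =
          (PySem.List.pyRange 0 size 1).map (fun c => ((0 : Int), c)) := by
        apply List.filter_eq_self.mpr
        intro cell hcell
        simp only [List.mem_map] at hcell
        obtain ⟨c, _, rfl⟩ := hcell
        simp
      have hmidf :
          ((PySem.List.pyRange 1 (size - 1) 1).flatMap
            (fun r => [(r, (0 : Int)), (r, size - 1)])).filter
            (fun cell => decide (cell ≠ ((2 : Int), (2 : Int)))) =
          (PySem.List.pyRange 1 (size - 1) 1).flatMap
            (fun r => [(r, (0 : Int)), (r, size - 1)]) := by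
        apply List.filter_eq_self.mpr
        intro cell hcell
        simp only [List.mem_flatMap] at hcell
        obtain ⟨r, hr, hcell⟩ := hcell
        rw [PySem.List.mem_pyRange_one] at hr
        simp only [List.mem_cons, List.mem_singleton] at hcell
        rcases hcell with rfl | rfl | hfalse
        · simp [Prod.ext_iff] <;> omega
        · simp [Prod.ext_iff] <;> omega
        · cases hfalse
      rw [hrow0, hmidflat, hbot, List.filter_append, List.filter_append, htopf, hmidf]

-- ===== VERDICT (by name: the statement is the Claim_ definition above) =====
theorem get_mirror_chambers_spec : Claim_equal_get_mirror_chambers := by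
  intro size _
  exact getmc_main size
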